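-- pv_equiv track=rewrite | github.com/FarzanaEva/Data-Structure-and-Algorithm-Practice | InterviewBit Problems/Hashing/an_increment_problem.py | solve
-- ===== SOURCE A (Python) =====
-- def solve(A):
--     new_strm = []
--
--     for i in range(len(A)):
--         for j in range(len(new_strm)):
--             if A[i] == new_strm[j]:
--                 new_strm[j] += 1
--                 break
--         new_strm.append(A[i])
--
--     return new_strm
-- ===== SOURCE B (Python) =====
-- def _insert(b, j):
--     # insert j into the increasing list b at its sorted position (hand-written bisect_left)
--     lo, hi = 0, len(b)
--     while lo < hi:
--         mid = (lo + hi) // 2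
--         if b[mid] < j:
--             lo = mid + 1
--         else:
--             hi = mid
--     b.insert(lo, j)
--
--
-- def solve(A):
--     res = []
--     buckets = {}  # value -> increasing list of positions currently holding that value
--     for x in A:
--         b = buckets.get(x)
--         if b:
--             j = b.pop(0)
--             res[j] += 1
--             _insert(buckets.setdefault(x + 1, []), j)
--         _insert(buckets.setdefault(x, []), len(res))
--         res.append(x)
--     return res
-- ===== Notes on version B (the rewrite author's own statement) =====
-- stated objective: faster
-- what changed: Instead of rescanning the whole output list for the first occurrence of each incoming value, B keeps a dict mapping each value to the increasing list of positions currently holding it, pops the minimal position and moves it to the next value's bucket via a hand-written binary-search insertion.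
import Mathlib
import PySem

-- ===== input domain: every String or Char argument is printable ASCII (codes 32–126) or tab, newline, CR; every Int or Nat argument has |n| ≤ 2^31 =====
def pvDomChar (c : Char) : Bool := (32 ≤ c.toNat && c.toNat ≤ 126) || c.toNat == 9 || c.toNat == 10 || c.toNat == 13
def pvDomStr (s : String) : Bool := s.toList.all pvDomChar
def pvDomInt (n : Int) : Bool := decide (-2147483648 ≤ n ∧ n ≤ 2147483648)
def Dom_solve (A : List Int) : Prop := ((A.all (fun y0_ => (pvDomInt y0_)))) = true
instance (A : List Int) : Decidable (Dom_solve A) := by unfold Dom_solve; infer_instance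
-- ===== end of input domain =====

-- B replaces A's rescan of the whole output per element by per-value sorted buckets of positions (dict), so each element touches only its own bucket.


-- ===== PORT A =====
-- inner loop of A: scan new_strm, increment the first element equal to x, break
def bumpFirst (l : List Int) (x : Int) : List Int :=
  match l with
  | [] => []
  | a :: t => if a = x then (a + 1) :: t else a :: bumpFirst t x

def solve (A : List Int) : List Int :=
  A.foldl (fun l x => bumpFirst l x ++ [x]) []

-- ===== PORT B =====
-- _insert: hand-written bisect_left, then list.insert at that position
def bInsert (b : List Int) (j : Int) : List Int :=
  PySem.List.insert b ((PySem.List.bisectLeft b j : Nat) : Int) j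

def setInc (l : List Int) (j : Int) : List Int :=
  match l with
  | [] => []
  | a :: t => if j = 0 then (a + 1) :: t else a :: setInc t (j - 1)

def stepB (s : List Int × PySem.Dict Int (List Int)) (x : Int) : List Int × PySem.Dict Int (List Int) :=
  match s with
  | (res, d) =>
    match d.getD x [] with
    | [] => (res ++ [x], d.insert x (bInsert [] (res.length : Int)))
    | j :: rest =>
        let res' := setInc res j
        let d1 := d.insert x rest
        let d2 := d1.insert (x + 1) (bInsert (d1.getD (x + 1) []) j)
        let d3 := d2.insert x (bInsert (d2.getD x []) (res.length : Int))
        (res' ++ [x], d3)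

def solve_alt (A : List Int) : List Int :=
  (A.foldl stepB ([], PySem.Dict.empty)).1

-- ===== PRECONDITION & SPEC =====
def Spec_solve (A : List Int) (out : List Int) : Prop := out = solve_alt A
instance (A : List Int) (out : List Int) : Decidable (Spec_solve A out) := by unfold Spec_solve; infer_instance

-- ===== CLAIM (what is proved, stated in full; the proofs are below) =====
def Claim_equal_solve : Prop := ∀ (A : List Int), Dom_solve A → Spec_solve A (solve A)

-- ===== LEMMAS AND PROOFS =====

-- positions (as Ints, offset i) of the elements of l equal to v, in increasing order
def occ (l : List Int) (v : Int) (i : Int) : List Int :=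
  match l with
  | [] => []
  | a :: t => (if a = v then [i] else []) ++ occ t v (i + 1)

-- linear sorted insertion: the reference form of bInsert on a sorted list
def insSorted (j : Int) (b : List Int) : List Int :=
  match b with
  | [] => [j]
  | a :: t => if a < j then a :: insSorted j t else j :: a :: t

theorem insSorted_eq_take_drop (j : Int) :
    ∀ (b : List Int) (k : Nat), k ≤ b.length →
      (∀ (i : Nat) (_ : i < b.length), i < k → b[i] < j) →
      (∀ (i : Nat) (_ : i < b.length), k ≤ i → j ≤ b[i]) →
      insSorted j b = b.take k ++ j :: b.drop k := by
  intro b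
  induction b with
  | nil =>
    intro k hk _ _
    have : k = 0 := by simpa using hk
    simp [this, insSorted]
  | cons a t ih =>
    intro k hk hlt hge
    cases k with
    | zero =>
      have hja : j ≤ a := hge 0 (by simp) (by omega)
      simp [insSorted, show ¬ (a < j) from by omega]
    | succ k =>
      have ha : a < j := hlt 0 (by simp) (by omega)
      simp only [insSorted, if_pos ha, List.take_succ_cons, List.drop_succ_cons,
        List.cons_append, List.cons.injEq, true_and]
      exact ih k (by simpa using hk)
        (fun i h hi => hlt (i + 1) (by simpa using h) (by omega))
        (fun i h hi => hge (i + 1) (by simpa using h) (by omega))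

theorem occ_mem_bounds {l : List Int} {v i j : Int} (h : j ∈ occ l v i) :
    i ≤ j ∧ j < i + l.length := by
  induction l generalizing i with
  | nil => simp [occ] at h
  | cons a t ih =>
    simp only [occ, List.mem_append] at h
    rcases h with h | h
    · by_cases hav : a = v
      · simp only [if_pos hav, List.mem_singleton] at h
        subst h
        simp only [List.length_cons]
        push_cast
        omega
      · simp [if_neg hav] at h
    · have := ih h
      simp only [List.length_cons]
      push_cast
      push_cast at this
      omega
theorem occ_pairwise (l : List Int) (v i : Int) : (occ l v i).Pairwise (· ≤ ·) := by
  induction l generalizing i with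
  | nil => simp [occ]
  | cons a t ih =>
    simp only [occ]
    by_cases hav : a = v
    · simp only [if_pos hav, List.cons_append, List.nil_append, List.pairwise_cons]
      exact ⟨fun b hb => by have := occ_mem_bounds hb; omega, ih (i + 1)⟩
    · simp only [if_neg hav, List.nil_append]
      exact ih (i + 1)

theorem bInsert_eq_insSorted {b : List Int} (j : Int) (hs : b.Pairwise (· ≤ ·)) :
    bInsert b j = insSorted j b := by
  obtain ⟨hk, hlt, hge⟩ := PySem.List.bisectLeft_spec b j hs
  rw [bInsert, PySem.List.insert_natCast _ _ _ hk]
  exact (insSorted_eq_take_drop j b _ hk hlt hge).symm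

theorem occ_append_singleton (l : List Int) (x v i : Int) :
    occ (l ++ [x]) v i = occ l v i ++ (if x = v then [i + l.length] else []) := by
  induction l generalizing i with
  | nil => simp [occ]
  | cons a t ih =>
    simp only [List.cons_append, occ, ih, List.length_cons, List.append_assoc]
    congr 2
    split <;> push_cast <;> ring_nf

theorem setInc_length (l : List Int) (j : Int) : (setInc l j).length = l.length := by
  induction l generalizing j with
  | nil => rfl
  | cons a t ih => simp only [setInc]; split <;> simp [ih]

theorem insSorted_of_all_lt {b : List Int} {j : Int} (h : ∀ a ∈ b, a < j) :
    insSorted j b = b ++ [j] := by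
  induction b with
  | nil => rfl
  | cons a t ih =>
    simp only [insSorted, if_pos (h a (by simp)), List.cons_append]
    rw [ih (fun a ha => h a (by simp [ha]))]

theorem insSorted_of_all_gt {b : List Int} {j : Int} (h : ∀ a ∈ b, j < a) :
    insSorted j b = j :: b := by
  cases b with
  | nil => rfl
  | cons a t => simp only [insSorted]; rw [if_neg]; have := h a (by simp); omega

theorem bumpFirst_of_occ_nil {l : List Int} {x i : Int} (h : occ l x i = []) :
    bumpFirst l x = l := by
  induction l generalizing i with
  | nil => rfl
  | cons a t ih =>
    simp only [occ] at h
    by_cases hax : a = x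
    · simp [hax] at h
    · simp only [bumpFirst, if_neg hax]
      simp only [if_neg hax, List.nil_append] at h
      rw [ih h]

theorem bumpFirst_of_occ_cons {l : List Int} {x i j : Int} {rest : List Int}
    (h : occ l x i = j :: rest) : bumpFirst l x = setInc l (j - i) := by
  induction l generalizing i rest with
  | nil => simp [occ] at h
  | cons a t ih =>
    simp only [occ] at h
    by_cases hax : a = x
    · simp only [if_pos hax, List.cons_append, List.nil_append] at h
      injection h with h1 h2
      have h0 : j - i = 0 := by omega
      simp [bumpFirst, hax, setInc, h0]
    · simp only [if_neg hax, List.nil_append] at h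
      have hb := occ_mem_bounds (l := t) (v := x) (i := i + 1) (j := j) (by rw [h]; simp)
      have hne : ¬ (j - i = 0) := by omega
      simp only [bumpFirst, if_neg hax, setInc, if_neg hne]
      rw [show j - i - 1 = j - (i + 1) from by omega, ih h]
theorem occ_setInc {l : List Int} {x i j : Int} {rest : List Int}
    (h : occ l x i = j :: rest) (v : Int) :
    occ (setInc l (j - i)) v i =
      if v = x then rest else if v = x + 1 then insSorted j (occ l v i) else occ l v i := by
  induction l generalizing i rest with
  | nil => simp [occ] at h
  | cons a t ih =>
    simp only [occ] at h
    by_cases hax : a = x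
    · simp only [if_pos hax, List.cons_append, List.nil_append] at h
      injection h with h1 h2
      have h0 : j - i = 0 := by omega
      rw [h0, show setInc (a :: t) 0 = (a + 1) :: t from by simp [setInc]]
      by_cases hvx : v = x
      · have hne : ¬ (a + 1 = x) := by omega
        rw [hvx]
        simp [occ, hne, h2]
      · by_cases hv1 : v = x + 1
        · have hp : a + 1 = v := by omega
          have hane : ¬ (a = v) := by omega
          have hgt : ∀ b ∈ occ t v (i + 1), j < b := by
            intro b hb; have := occ_mem_bounds hb; omega
          simp only [if_neg hvx, if_pos hv1]
          rw [show occ (a :: t) v i = occ t v (i + 1) from by simp [occ, hane]]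
          rw [insSorted_of_all_gt hgt, ← h1]
          simp [occ, hp]
        · have hane : ¬ (a = v) := by omega
          have hp : ¬ (a + 1 = v) := by omega
          simp [occ, hp, hane, if_neg hvx, if_neg hv1]
    · simp only [if_neg hax, List.nil_append] at h
      have hb := occ_mem_bounds (l := t) (v := x) (i := i + 1) (j := j) (by rw [h]; simp)
      have hne : ¬ (j - i = 0) := by omega
      simp only [setInc, if_neg hne, occ]
      rw [show j - i - 1 = j - (i + 1) from by omega, ih h]
      by_cases hvx : v = x
      · simp [hvx, hax]
      · by_cases hv1 : v = x + 1
        · simp only [if_neg hvx, if_pos hv1]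
          by_cases hav : a = v
          · simp only [if_pos hav, List.cons_append, List.nil_append, insSorted]
            rw [if_pos (by omega)]
          · simp [if_neg hav]
        · simp [if_neg hvx, if_neg hv1]
theorem fold_eq (A : List Int) :
    ∀ (l : List Int) (d : PySem.Dict Int (List Int)),
      (∀ v, d.getD v [] = occ l v 0) →
      (A.foldl stepB (l, d)).1 = A.foldl (fun l x => bumpFirst l x ++ [x]) l := by
  induction A with
  | nil => intro l d _; rfl
  | cons x t ih =>
    intro l d hInv
    simp only [List.foldl_cons]
    cases hocc : d.getD x [] with
    | nil =>
      have hoc : occ l x 0 = [] := by rw [← hInv x, hocc]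
      have hbump : bumpFirst l x = l := bumpFirst_of_occ_nil hoc
      have hstep : stepB (l, d) x = (l ++ [x], d.insert x (bInsert [] (l.length : Int))) := by
        simp [stepB, hocc]
      rw [hstep, hbump, bInsert_eq_insSorted _ (by simp)]
      apply ih
      intro v
      rw [PySem.Dict.getD_insert, occ_append_singleton, hInv v]
      by_cases hvx : v = x
      · subst hvx; simp [hoc, insSorted]
      · simp [hvx, Ne.symm hvx]
    | cons j rest =>
      have hoc : occ l x 0 = j :: rest := by rw [← hInv x, hocc]
      have hbump : bumpFirst l x = setInc l j := by
        have := bumpFirst_of_occ_cons (i := 0) hoc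
        simpa using this
      have hset : ∀ v, occ (setInc l j) v 0 =
          if v = x then rest else if v = x + 1 then insSorted j (occ l v 0) else occ l v 0 := by
        intro v
        have := occ_setInc (i := 0) hoc v
        simpa using this
      have hx1 : (x + 1 : Int) ≠ x := by omega
      have hstep : stepB (l, d) x =
          (setInc l j ++ [x],
            ((d.insert x rest).insert (x + 1)
                (bInsert ((d.insert x rest).getD (x + 1) []) j)).insert x
              (bInsert
                (((d.insert x rest).insert (x + 1)
                    (bInsert ((d.insert x rest).getD (x + 1) []) j)).getD x [])
                (l.length : Int))) := by
        simp [stepB, hocc]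
      rw [hstep, hbump]
      apply ih
      intro v
      have hg1 : (d.insert x rest).getD (x + 1) [] = occ l (x + 1) 0 := by
        rw [PySem.Dict.getD_insert, if_neg hx1, hInv]
      have hsor : (j :: rest).Pairwise (· ≤ ·) := by
        have := occ_pairwise l x 0
        rwa [hoc] at this
      have hg2 : ((d.insert x rest).insert (x + 1)
          (bInsert ((d.insert x rest).getD (x + 1) []) j)).getD x [] = rest := by
        rw [PySem.Dict.getD_insert, if_neg (by omega), PySem.Dict.getD_insert, if_pos rfl]
      rw [hg2, hg1]
      rw [bInsert_eq_insSorted j (occ_pairwise l (x + 1) 0),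
        bInsert_eq_insSorted _ (List.pairwise_cons.mp hsor).2]
      rw [PySem.Dict.getD_insert, PySem.Dict.getD_insert, PySem.Dict.getD_insert]
      rw [occ_append_singleton, hset v, setInc_length]
      by_cases hvx : v = x
      · subst hvx
        have hlt : ∀ a ∈ rest, a < (l.length : Int) := by
          intro a ha
          have : a ∈ occ l v 0 := by rw [hoc]; simp [ha]
          have := occ_mem_bounds this
          omega
        rw [insSorted_of_all_lt hlt]
        simp
      · by_cases hv1 : v = x + 1
        · subst hv1; simp [hx1.symm]
        · simp [if_neg hvx, if_neg hv1, Ne.symm hvx, hInv v]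

-- ===== VERDICT (by name: the statement is the Claim_ definition above) =====
theorem solve_spec : Claim_equal_solve := by
  intro A _
  unfold Spec_solve solve solve_alt
  symm
  apply fold_eq
  intro v
  simp [PySem.Dict.getD_empty, occ]
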